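-- pv_equiv track=rewrite | github.com/sharma-anubhav/CrackingTheCodingInterview-DSA | ch36(Graphs)/36.5.py | connected_component_queries
-- ===== SOURCE A (Python) =====
-- def connected_component_queries(graph, queries):
--     visited = {}
--
--     def dfs(node, cc_id):
--         visited[node] = cc_id
--         for nbr in graph[node]:
--             if nbr not in visited:
--                 dfs(nbr, cc_id)
--
--     cc_id = 0
--     for i in range(len(graph)):
--         if i not in visited:
--             cc_id+=1
--             dfs(i, cc_id)
--
--     res = []
--     for node1, node2 in queries:
--         res.append(visited[node1] == visited[node2])
--     return res
-- ===== SOURCE B (Python) =====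
-- def connected_component_queries(graph, queries):
--     # Level-synchronous BFS flood fill: expand a whole frontier per round,
--     # instead of A's recursive DFS.
--     label = {}
--     comp = 0
--     for start in range(len(graph)):
--         if start in label:
--             continue
--         comp += 1
--         label[start] = comp
--         frontier = [start]
--         while frontier:
--             nxt = []
--             for u in frontier:
--                 for v in graph[u]:
--                     if v not in label:
--                         label[v] = comp
--                         nxt.append(v)
--             frontier = nxt
--     return [label[a] == label[b] for a, b in queries]
-- ===== Notes on version B (the rewrite author's own statement) =====
-- stated objective: alternative
-- what changed: Replaces A's recursive DFS flood fill (nested dfs + append loop over queries) by an iterative level-synchronous BFS: each round expands a whole frontier list into the next one, labels are kept in a dict, and the answers come from a list comprehension; the labelled regions coincide because both mark exactly the vertices reachable from the current root through previously unlabelled vertices.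
import Mathlib
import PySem

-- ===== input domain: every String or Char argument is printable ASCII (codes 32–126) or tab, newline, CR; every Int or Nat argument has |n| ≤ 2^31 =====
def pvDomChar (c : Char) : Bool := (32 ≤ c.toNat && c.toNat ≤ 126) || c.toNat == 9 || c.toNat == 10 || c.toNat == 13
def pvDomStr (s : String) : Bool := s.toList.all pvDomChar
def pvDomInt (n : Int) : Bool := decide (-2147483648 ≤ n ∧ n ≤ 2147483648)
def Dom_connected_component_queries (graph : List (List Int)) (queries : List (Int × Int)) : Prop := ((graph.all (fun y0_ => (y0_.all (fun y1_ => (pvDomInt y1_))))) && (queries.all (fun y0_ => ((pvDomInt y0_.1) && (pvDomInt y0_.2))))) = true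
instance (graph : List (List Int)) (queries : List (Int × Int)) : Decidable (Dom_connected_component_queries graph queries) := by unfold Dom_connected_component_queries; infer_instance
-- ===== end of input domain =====

-- B replaces A's recursive DFS flood fill by an iterative level-synchronous BFS (whole-frontier
-- rounds) and a comprehension over the queries; same labels (objective: alternative).

-- ===== PORT A =====
-- graph[node]: under Pre_ every looked-up index is in range, so the IndexError case never occurs.
def pvNbrs (g : List (List Int)) (u : Int) : List Int := (PySem.List.pyGet? g u).getD []

-- A's recursive dfs. Python recursion has no fuel; the Nat fuel is an artifact of totality:
-- with fuel = 2*len(graph) it is never exhausted on inputs satisfying Pre_ (proved below).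
mutual
def pvDfsA (g : List (List Int)) (cc : Int) : Nat → Int → PySem.Dict Int Int → PySem.Dict Int Int
  | 0, _, vis => vis
  | fuel+1, node, vis => pvDfsALoop g cc fuel (pvNbrs g node) (vis.insert node cc)
  termination_by fuel _ _ => (fuel, 0)
def pvDfsALoop (g : List (List Int)) (cc : Int) : Nat → List Int → PySem.Dict Int Int → PySem.Dict Int Int
  | _, [], vis => vis
  | fuel, nbr :: rest, vis =>
      pvDfsALoop g cc fuel rest (if vis.get? nbr = none then pvDfsA g cc fuel nbr vis else vis)
  termination_by fuel l _ => (fuel, l.length + 1)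
end

def connected_component_queries (graph : List (List Int)) (queries : List (Int × Int)) : List Bool :=
  let st := (PySem.List.pyRange 0 (graph.length : Int) 1).foldl
      (fun (st : Int × PySem.Dict Int Int) i =>
        if st.2.get? i = none then (st.1 + 1, pvDfsA graph (st.1 + 1) (2 * graph.length) i st.2) else st)
      (0, PySem.Dict.empty)
  -- visited[node1] == visited[node2]: under Pre_ both keys are present (KeyError excluded by Pre_)
  queries.foldl (fun res q => res ++ [decide (st.2.get? q.1 = st.2.get? q.2)]) []

-- ===== PORT B =====
-- inner 'for v in graph[u]': append each still-unlabelled neighbour to nxt, labelling it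
def pvScanB (g : List (List Int)) (comp : Int) : List Int → List Int × PySem.Dict Int Int → List Int × PySem.Dict Int Int
  | [], st => st
  | v :: vs, st =>
      pvScanB g comp vs (if st.2.get? v = none then (st.1 ++ [v], st.2.insert v comp) else st)

-- middle 'for u in frontier'
def pvRoundB (g : List (List Int)) (comp : Int) : List Int → List Int × PySem.Dict Int Int → List Int × PySem.Dict Int Int
  | [], st => st
  | u :: us, st => pvRoundB g comp us (pvScanB g comp (pvNbrs g u) st)

-- 'while frontier': each round replaces the frontier by the freshly labelled vertices.
-- fuel = 2*len(graph) is never exhausted on inputs satisfying Pre_ (proved below).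
def pvBfsB (g : List (List Int)) (comp : Int) : Nat → List Int → PySem.Dict Int Int → PySem.Dict Int Int
  | _, [], lab => lab
  | 0, _ :: _, lab => lab
  | fuel+1, frontier, lab =>
      let st := pvRoundB g comp frontier ([], lab)
      pvBfsB g comp fuel st.1 st.2

-- 'for start in range(len(graph)): if start in label: continue; …'
def pvOuterB (g : List (List Int)) : List Nat → Int → PySem.Dict Int Int → PySem.Dict Int Int
  | [], _, lab => lab
  | s :: rest, comp, lab =>
      if lab.get? (s : Int) = none then
        pvOuterB g rest (comp + 1)
          (pvBfsB g (comp + 1) (2 * g.length) [(s : Int)] (lab.insert (s : Int) (comp + 1)))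
      else pvOuterB g rest comp lab

def connected_component_queries_alt (graph : List (List Int)) (queries : List (Int × Int)) : List Bool :=
  let lab := pvOuterB graph (List.range graph.length) 0 PySem.Dict.empty
  queries.map (fun q => decide (lab.get? q.1 = lab.get? q.2))

-- ===== PRECONDITION & SPEC =====
-- Pre_ = exactly the inputs on which A returns normally: every neighbour is a valid (possibly
-- negative, Python-wraparound) list index, and every query endpoint is a visited dict key — a
-- vertex of range(len(graph)) or a (negative) index occurring in some adjacency row (every row is
-- scanned, so every listed neighbour is visited).  Outside Pre_ A raises IndexError or KeyError.
def pvQOk (graph : List (List Int)) (e : Int) : Prop :=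
  (0 ≤ e ∧ e < (graph.length : Int)) ∨
  (-(graph.length : Int) ≤ e ∧ e < 0 ∧ ∃ row ∈ graph, e ∈ row)
def Pre_connected_component_queries (graph : List (List Int)) (queries : List (Int × Int)) : Prop :=
  (∀ row ∈ graph, ∀ x ∈ row, -(graph.length : Int) ≤ x ∧ x < (graph.length : Int)) ∧
  (∀ q ∈ queries, pvQOk graph q.1 ∧ pvQOk graph q.2)
instance (graph : List (List Int)) (queries : List (Int × Int)) : Decidable (Pre_connected_component_queries graph queries) := by unfold Pre_connected_component_queries pvQOk; infer_instance

def pvWitness_connected_component_queries : List (List Int) × (List (Int × Int)) :=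
  ([[1], [0], []], [(0, 1), (1, 2), (2, 2)])

def Spec_connected_component_queries (graph : List (List Int)) (queries : List (Int × Int)) (out : List Bool) : Prop := out = connected_component_queries_alt graph queries
instance (graph : List (List Int)) (queries : List (Int × Int)) (out : List Bool) : Decidable (Spec_connected_component_queries graph queries out) := by unfold Spec_connected_component_queries; infer_instance

-- ===== CLAIM (what is proved, stated in full; the proofs are below) =====
def Claim_equal_connected_component_queries : Prop := ∀ (graph : List (List Int)) (queries : List (Int × Int)), Dom_connected_component_queries graph queries → Pre_connected_component_queries graph queries → Spec_connected_component_queries graph queries (connected_component_queries graph queries)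


-- ===== LEMMAS AND PROOFS =====

-- the set of already-labelled vertices, as a predicate
def pvDm (vis : PySem.Dict Int Int) : Int → Prop := fun v => vis.get? v ≠ none

-- reachability from i along edges whose source is outside the avoid-set V
inductive pvReach (g : List (List Int)) (V : Int → Prop) : Int → Int → Prop
  | refl (i : Int) : pvReach g V i i
  | step {i u v : Int} : pvReach g V i u → ¬ V u → v ∈ pvNbrs g u → pvReach g V i v

-- every neighbour list only mentions vertices in range (consequence of Pre_)
def pvGood (g : List (List Int)) : Prop :=
  ∀ u : Int, ∀ v ∈ pvNbrs g u, -(g.length : Int) ≤ v ∧ v < (g.length : Int)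

-- number of vertices of range(len(g)) not yet labelled: the fuel measure
def pvUnm (g : List (List Int)) (vis : PySem.Dict Int Int) : Nat :=
  ((List.range (2 * g.length)).filter
    (fun (j : Nat) => decide (vis.get? ((j : Int) - (g.length : Int)) = none))).length

theorem pvReach_trans {g : List (List Int)} {V : Int → Prop} {i u v : Int}
    (h1 : pvReach g V i u) (h2 : pvReach g V u v) : pvReach g V i v := by
  induction h2 with
  | refl => exact h1
  | step _ hu hw ih => exact pvReach.step ih hu hw

theorem pvReach_anti {g : List (List Int)} {V V' : Int → Prop} {i v : Int}
    (hsub : ∀ x, V x → V' x) (h : pvReach g V' i v) : pvReach g V i v := by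
  induction h with
  | refl => exact pvReach.refl i
  | step _ hu hw ih => exact pvReach.step ih (fun hx => hu (hsub _ hx)) hw

theorem pvGood_of_pre {g : List (List Int)}
    (h : ∀ row ∈ g, ∀ x ∈ row, -(g.length : Int) ≤ x ∧ x < (g.length : Int)) : pvGood g := by
  intro u v hv
  unfold pvNbrs at hv
  cases hrow : PySem.List.pyGet? g u with
  | none => rw [hrow] at hv; simp at hv
  | some row =>
    rw [hrow] at hv
    exact h row (PySem.List.mem_of_pyGet?_eq_some g hrow) v hv

theorem pvUnm_le (g : List (List Int)) (vis : PySem.Dict Int Int) :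
    pvUnm g vis ≤ 2 * g.length := by
  unfold pvUnm
  calc ((List.range (2 * g.length)).filter _).length ≤ (List.range (2 * g.length)).length :=
        List.length_filter_le _ _
    _ = 2 * g.length := List.length_range

theorem pvFilterHelper : ∀ (l : List Nat) (a : Nat) (p q : Nat → Bool), l.Nodup → a ∈ l →
    p a = true → q a = false → (∀ x, x ≠ a → q x = p x) →
    (l.filter q).length + 1 ≤ (l.filter p).length := by
  intro l a p q hnd ha hp hq hother
  induction l with
  | nil => simp at ha
  | cons x l ih =>
    rcases List.mem_cons.mp ha with rfl | ha'
    · have hql : l.filter q = l.filter p := by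
        apply List.filter_congr
        intro y hy
        exact hother y (fun hya => (List.nodup_cons.mp hnd).1 (hya ▸ hy))
      simp [hp, hq, hql]
    · have hx : x ≠ a := fun hxa => (List.nodup_cons.mp hnd).1 (hxa ▸ ha')
      have := ih (List.nodup_cons.mp hnd).2 ha'
      by_cases hpx : p x = true
      · simp [hother x hx, hpx] at this ⊢; omega
      · have hpx' : p x = false := by revert hpx; cases p x <;> simp
        simp [hpx', hother x hx] at this ⊢; omega

theorem pvUnm_insert {g : List (List Int)} {vis : PySem.Dict Int Int} {node cc : Int}
    (h : vis.get? node = none) (h0 : -(g.length : Int) ≤ node) (hl : node < (g.length : Int)) :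
    pvUnm g (vis.insert node cc) + 1 ≤ pvUnm g vis := by
  unfold pvUnm
  apply pvFilterHelper (List.range (2 * g.length)) (node + (g.length : Int)).toNat _ _
    List.nodup_range (List.mem_range.mpr (by omega))
  · show decide (vis.get? ((((node + (g.length : Int)).toNat : Nat) : Int) - (g.length : Int))
        = none) = true
    rw [show ((((node + (g.length : Int)).toNat : Nat) : Int) - (g.length : Int)) = node from
        by omega, h]
    simp
  · show decide ((vis.insert node cc).get?
        ((((node + (g.length : Int)).toNat : Nat) : Int) - (g.length : Int)) = none) = false
    rw [show ((((node + (g.length : Int)).toNat : Nat) : Int) - (g.length : Int)) = node from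
        by omega, PySem.Dict.get?_insert_self]
    simp
  · intro x hx
    have hxn : ((x : Int) - (g.length : Int)) ≠ node := by
      intro hxe; apply hx; omega
    simp [PySem.Dict.get?_insert_of_ne _ _ hxn]

theorem pvUnm_mono {g : List (List Int)} {vis vis' : PySem.Dict Int Int}
    (h : ∀ v, vis.get? v ≠ none → vis'.get? v ≠ none) : pvUnm g vis' ≤ pvUnm g vis := by
  unfold pvUnm
  rw [← List.countP_eq_length_filter, ← List.countP_eq_length_filter]
  apply List.countP_mono_left
  intro a _ hq
  simp only [decide_eq_true_eq] at hq ⊢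
  by_contra hne
  exact (h _ hne) hq

theorem pvUnm_pos {g : List (List Int)} {vis : PySem.Dict Int Int} {node : Int}
    (h : vis.get? node = none) (h0 : -(g.length : Int) ≤ node) (hl : node < (g.length : Int)) :
    1 ≤ pvUnm g vis := by
  have hmem : (node + (g.length : Int)).toNat ∈ (List.range (2 * g.length)).filter
      (fun (j : Nat) => decide (vis.get? ((j : Int) - (g.length : Int)) = none)) := by
    refine List.mem_filter.mpr ⟨List.mem_range.mpr (by omega), ?_⟩
    show decide (vis.get? ((((node + (g.length : Int)).toNat : Nat) : Int) - (g.length : Int))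
        = none) = true
    rw [show ((((node + (g.length : Int)).toNat : Nat) : Int) - (g.length : Int)) = node from
        by omega, h]
    simp
  have hne := List.ne_nil_of_mem hmem
  unfold pvUnm
  cases hfl : (List.range (2 * g.length)).filter
      (fun (j : Nat) => decide (vis.get? ((j : Int) - (g.length : Int)) = none)) with
  | nil => exact absurd hfl hne
  | cons a l => simp [hfl] at hne ⊢

-- ---- A-side flood characterisation ----

theorem pvDfsA_spec (g : List (List Int)) (HG : pvGood g) :
    ∀ (fuel : Nat) (vis : PySem.Dict Int Int) (node cc : Int),
    pvUnm g vis ≤ fuel → -(g.length : Int) ≤ node → node < (g.length : Int) →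
    vis.get? node = none →
    (∀ v, vis.get? v ≠ none → (pvDfsA g cc fuel node vis).get? v = vis.get? v) ∧
    (pvDfsA g cc fuel node vis).get? node = some cc ∧
    (∀ v, vis.get? v = none → (pvDfsA g cc fuel node vis).get? v ≠ none →
       (pvDfsA g cc fuel node vis).get? v = some cc ∧ pvReach g (pvDm vis) node v) ∧
    (∀ u, vis.get? u = none → (pvDfsA g cc fuel node vis).get? u ≠ none →
       ∀ w ∈ pvNbrs g u, (pvDfsA g cc fuel node vis).get? w ≠ none) ∧
    pvUnm g (pvDfsA g cc fuel node vis) + 1 ≤ pvUnm g vis := by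
  intro fuel
  induction fuel with
  | zero =>
    intro vis node cc hf h0 hl hn
    have := pvUnm_pos hn h0 hl
    omega
  | succ fuel ih =>
    intro vis node cc hf h0 hl hn
    have F1 : ∀ v, vis.get? v ≠ none → (vis.insert node cc).get? v = vis.get? v :=
      fun v hv => PySem.Dict.get?_insert_of_ne _ _ (fun e => hv (e ▸ hn))
    have F2 : (vis.insert node cc).get? node = some cc := PySem.Dict.get?_insert_self _ _ _
    have F3 := pvUnm_insert (vis := vis) (cc := cc) hn h0 hl
    have loop : ∀ (l : List Int), (∀ w ∈ l, w ∈ pvNbrs g node) → ∀ (d : PySem.Dict Int Int),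
        (∀ v, (vis.insert node cc).get? v ≠ none →
            d.get? v = (vis.insert node cc).get? v) →
        (∀ v, vis.get? v = none → d.get? v ≠ none →
            d.get? v = some cc ∧ pvReach g (pvDm vis) node v) →
        (∀ u, vis.get? u = none → d.get? u ≠ none → u ≠ node →
            ∀ w ∈ pvNbrs g u, d.get? w ≠ none) →
        pvUnm g d + 1 ≤ pvUnm g vis →
        ((∀ v, (vis.insert node cc).get? v ≠ none →
            (pvDfsALoop g cc fuel l d).get? v = (vis.insert node cc).get? v) ∧
         (∀ v, vis.get? v = none → (pvDfsALoop g cc fuel l d).get? v ≠ none →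
            (pvDfsALoop g cc fuel l d).get? v = some cc ∧ pvReach g (pvDm vis) node v) ∧
         (∀ u, vis.get? u = none → (pvDfsALoop g cc fuel l d).get? u ≠ none → u ≠ node →
            ∀ w ∈ pvNbrs g u, (pvDfsALoop g cc fuel l d).get? w ≠ none) ∧
         pvUnm g (pvDfsALoop g cc fuel l d) + 1 ≤ pvUnm g vis ∧
         (∀ v, d.get? v ≠ none → (pvDfsALoop g cc fuel l d).get? v ≠ none) ∧
         (∀ w ∈ l, (pvDfsALoop g cc fuel l d).get? w ≠ none)) := by
      intro l
      induction l with
      | nil =>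
        intro _ d hd1 hd2 hd3 hd4
        simp only [pvDfsALoop]
        exact ⟨hd1, hd2, hd3, hd4, fun v hv => hv, by simp⟩
      | cons w l ihl =>
        intro hsub d hd1 hd2 hd3 hd4
        have hw : w ∈ pvNbrs g node := hsub w (by simp)
        have hsub' : ∀ w' ∈ l, w' ∈ pvNbrs g node :=
          fun w' hw' => hsub w' (List.mem_cons_of_mem _ hw')
        have heq : pvDfsALoop g cc fuel (w :: l) d =
            pvDfsALoop g cc fuel l (if d.get? w = none then pvDfsA g cc fuel w d else d) := by
          simp only [pvDfsALoop]
        by_cases hdw : d.get? w = none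
        · rw [heq, if_pos hdw]
          have hbw := HG node w hw
          have hfd : pvUnm g d ≤ fuel := by omega
          obtain ⟨A1, A2, A3, A4, A5⟩ := ih d w cc hfd hbw.1 hbw.2 hdw
          have hvismono : ∀ v, vis.get? v ≠ none → d.get? v ≠ none := by
            intro v hv
            rw [hd1 v (by rw [F1 v hv]; exact hv), F1 v hv]
            exact hv
          have hd1' : ∀ v, (vis.insert node cc).get? v ≠ none →
              (pvDfsA g cc fuel w d).get? v = (vis.insert node cc).get? v := by
            intro v hv
            rw [A1 v (by rw [hd1 v hv]; exact hv), hd1 v hv]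
          have hd2' : ∀ v, vis.get? v = none → (pvDfsA g cc fuel w d).get? v ≠ none →
              (pvDfsA g cc fuel w d).get? v = some cc ∧ pvReach g (pvDm vis) node v := by
            intro v hv hvd'
            by_cases hvd : d.get? v = none
            · obtain ⟨hval, hr⟩ := A3 v hvd hvd'
              refine ⟨hval, ?_⟩
              have hrw : pvReach g (pvDm vis) w v :=
                pvReach_anti (fun z hz => hvismono z hz) hr
              exact pvReach_trans (pvReach.step (pvReach.refl node) (fun h => h hn) hw) hrw
            · obtain ⟨hval, hr⟩ := hd2 v hv hvd
              exact ⟨by rw [A1 v hvd]; exact hval, hr⟩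
          have hd3' : ∀ u, vis.get? u = none → (pvDfsA g cc fuel w d).get? u ≠ none →
              u ≠ node → ∀ w' ∈ pvNbrs g u, (pvDfsA g cc fuel w d).get? w' ≠ none := by
            intro u hu hud' hune w' hw'
            by_cases hud : d.get? u = none
            · exact A4 u hud hud' w' hw'
            · have hsome := hd3 u hu hud hune w' hw'
              rw [A1 w' hsome]
              exact hsome
          have hd4' : pvUnm g (pvDfsA g cc fuel w d) + 1 ≤ pvUnm g vis := by
            have hm : pvUnm g (pvDfsA g cc fuel w d) ≤ pvUnm g d :=
              pvUnm_mono (fun v hv => by rw [A1 v hv]; exact hv)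
            omega
          obtain ⟨L1, L2, L3, L4, L5, L6⟩ := ihl hsub' (pvDfsA g cc fuel w d) hd1' hd2' hd3' hd4'
          refine ⟨L1, L2, L3, L4, ?_, ?_⟩
          · intro v hv
            exact L5 v (by rw [A1 v hv]; exact hv)
          · intro w' hw'
            rcases List.mem_cons.mp hw' with rfl | h
            · exact L5 w' (by rw [A2]; simp)
            · exact L6 w' h
        · rw [heq, if_neg hdw]
          obtain ⟨L1, L2, L3, L4, L5, L6⟩ := ihl hsub' d hd1 hd2 hd3 hd4
          refine ⟨L1, L2, L3, L4, L5, ?_⟩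
          intro w' hw'
          rcases List.mem_cons.mp hw' with rfl | h
          · exact L5 w' hdw
          · exact L6 w' h
    have I2 : ∀ v, vis.get? v = none → (vis.insert node cc).get? v ≠ none →
        (vis.insert node cc).get? v = some cc ∧ pvReach g (pvDm vis) node v := by
      intro v hv hvn
      by_cases hvnode : v = node
      · subst hvnode; exact ⟨F2, pvReach.refl v⟩
      · rw [PySem.Dict.get?_insert_of_ne _ _ hvnode] at hvn
        exact absurd hv hvn
    have I3 : ∀ u, vis.get? u = none → (vis.insert node cc).get? u ≠ none → u ≠ node →
        ∀ w ∈ pvNbrs g u, (vis.insert node cc).get? w ≠ none := by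
      intro u hu hun hune w hw
      rw [PySem.Dict.get?_insert_of_ne _ _ hune] at hun
      exact absurd hu hun
    obtain ⟨L1, L2, L3, L4, L5, L6⟩ :=
      loop (pvNbrs g node) (fun w hw => hw) (vis.insert node cc) (fun v _ => rfl) I2 I3 F3
    have heqA : pvDfsA g cc (fuel + 1) node vis =
        pvDfsALoop g cc fuel (pvNbrs g node) (vis.insert node cc) := by
      simp only [pvDfsA]
    rw [heqA]
    refine ⟨?_, ?_, L2, ?_, L4⟩
    · intro v hv
      rw [L1 v (by rw [F1 v hv]; exact hv), F1 v hv]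
    · rw [L1 node (by rw [F2]; simp), F2]
    · intro u hu hun w hw
      by_cases hunode : u = node
      · subst hunode; exact L6 w hw
      · exact L3 u hu hun hunode w hw

theorem pvDfsA_reach (g : List (List Int)) (HG : pvGood g)
    (fuel : Nat) (vis : PySem.Dict Int Int) (node cc : Int)
    (hf : pvUnm g vis ≤ fuel) (h0 : -(g.length : Int) ≤ node) (hl : node < (g.length : Int))
    (hn : vis.get? node = none) :
    ∀ v, pvReach g (pvDm vis) node v → (pvDfsA g cc fuel node vis).get? v ≠ none := by
  obtain ⟨_, hnode, _, hd, _⟩ := pvDfsA_spec g HG fuel vis node cc hf h0 hl hn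
  intro v hr
  induction hr with
  | refl => simp [hnode]
  | step hru hu hw ih =>
    rename_i i u w
    have hvu : vis.get? u = none := by
      by_contra hx; exact hu hx
    exact hd u hvu ih _ hw

theorem pvDfsA_char (g : List (List Int)) (HG : pvGood g)
    (vis : PySem.Dict Int Int) (i cc : Int)
    (h0 : 0 ≤ i) (hl : i < (g.length : Int)) (hn : vis.get? i = none) (v : Int) :
    (vis.get? v ≠ none → (pvDfsA g cc (2 * g.length) i vis).get? v = vis.get? v) ∧
    (vis.get? v = none → pvReach g (pvDm vis) i v →
        (pvDfsA g cc (2 * g.length) i vis).get? v = some cc) ∧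
    (vis.get? v = none → ¬ pvReach g (pvDm vis) i v →
        (pvDfsA g cc (2 * g.length) i vis).get? v = none) := by
  have h0' : -(g.length : Int) ≤ i := by omega
  obtain ⟨ha, hnode, hc, hd, _⟩ :=
    pvDfsA_spec g HG (2 * g.length) vis i cc (pvUnm_le g vis) h0' hl hn
  refine ⟨ha v, ?_, ?_⟩
  · intro hvn hr
    exact (hc v hvn
      (pvDfsA_reach g HG (2 * g.length) vis i cc (pvUnm_le g vis) h0' hl hn v hr)).1
  · intro hvn hr
    by_contra hne
    exact hr (hc v hvn hne).2

-- ---- B-side flood characterisation ----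

-- invariants of the inner neighbour scan, relative to the dict 'vis' at the start of the round
theorem pvScanB_spec (g : List (List Int)) (HG : pvGood g) (comp : Int) (F : List Int)
    (vis : PySem.Dict Int Int) (x : Int) (hxF : x ∈ F) :
    ∀ (l : List Int), (∀ w ∈ l, w ∈ pvNbrs g x) → ∀ (p : List Int × PySem.Dict Int Int),
    (∀ v, vis.get? v ≠ none → p.2.get? v = vis.get? v) →
    (∀ v, vis.get? v = none → p.2.get? v ≠ none → p.2.get? v = some comp ∧ v ∈ p.1) →
    (∀ y ∈ p.1, p.2.get? y = some comp ∧ -(g.length : Int) ≤ y ∧ y < (g.length : Int) ∧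
        vis.get? y = none ∧ ∃ u ∈ F, y ∈ pvNbrs g u) →
    p.1.length + pvUnm g p.2 ≤ pvUnm g vis →
    ((∀ v, vis.get? v ≠ none → (pvScanB g comp l p).2.get? v = vis.get? v) ∧
     (∀ v, vis.get? v = none → (pvScanB g comp l p).2.get? v ≠ none →
         (pvScanB g comp l p).2.get? v = some comp ∧ v ∈ (pvScanB g comp l p).1) ∧
     (∀ y ∈ (pvScanB g comp l p).1, (pvScanB g comp l p).2.get? y = some comp ∧
         -(g.length : Int) ≤ y ∧ y < (g.length : Int) ∧ vis.get? y = none ∧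
         ∃ u ∈ F, y ∈ pvNbrs g u) ∧
     ((pvScanB g comp l p).1.length + pvUnm g (pvScanB g comp l p).2 ≤ pvUnm g vis) ∧
     (∀ w ∈ l, (pvScanB g comp l p).2.get? w ≠ none) ∧
     (∀ v, p.2.get? v ≠ none → (pvScanB g comp l p).2.get? v ≠ none) ∧
     (∀ y ∈ p.1, y ∈ (pvScanB g comp l p).1)) := by
  intro l
  induction l with
  | nil =>
    intro _ p h1 h2 h3 h4
    simp only [pvScanB]
    exact ⟨h1, h2, h3, h4, by simp, fun v hv => hv, fun y hy => hy⟩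
  | cons w l ih =>
    intro hsub p h1 h2 h3 h4
    have hw : w ∈ pvNbrs g x := hsub w (by simp)
    have hsub' : ∀ w' ∈ l, w' ∈ pvNbrs g x := fun w' hw' => hsub w' (by simp [hw'])
    have heq : pvScanB g comp (w :: l) p =
        pvScanB g comp l (if p.2.get? w = none then (p.1 ++ [w], p.2.insert w comp) else p) := by
      simp only [pvScanB]
    by_cases hpw : p.2.get? w = none
    · have hvisw : vis.get? w = none := by
        by_contra hvw
        exact absurd (h1 w hvw ▸ hpw) hvw
      have hb := HG x w hw
      have h1' : ∀ v, vis.get? v ≠ none →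
          ((p.1 ++ [w], p.2.insert w comp) : List Int × PySem.Dict Int Int).2.get? v
            = vis.get? v := by
        intro v hv
        have hvw : v ≠ w := fun e => hv (e ▸ hvisw)
        simpa [PySem.Dict.get?_insert_of_ne _ _ hvw] using h1 v hv
      have h2' : ∀ v, vis.get? v = none → (p.2.insert w comp).get? v ≠ none →
          (p.2.insert w comp).get? v = some comp ∧ v ∈ p.1 ++ [w] := by
        intro v hv hne
        by_cases hvw : v = w
        · subst hvw; simp [PySem.Dict.get?_insert_self]
        · rw [PySem.Dict.get?_insert_of_ne _ _ hvw] at hne ⊢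
          obtain ⟨hval, hmem⟩ := h2 v hv hne
          exact ⟨hval, by simp [hmem]⟩
      have h3' : ∀ y ∈ p.1 ++ [w], (p.2.insert w comp).get? y = some comp ∧
          -(g.length : Int) ≤ y ∧ y < (g.length : Int) ∧ vis.get? y = none ∧
          ∃ u ∈ F, y ∈ pvNbrs g u := by
        intro y hy
        rcases List.mem_append.mp hy with hy' | hy'
        · obtain ⟨hval, hb1, hb2, hvn, hex⟩ := h3 y hy'
          have hyw : y ≠ w := fun e => by rw [e, hpw] at hval; simp at hval
          exact ⟨by rw [PySem.Dict.get?_insert_of_ne _ _ hyw]; exact hval, hb1, hb2, hvn, hex⟩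
        · have hyw : y = w := by simpa using hy'
          subst hyw
          exact ⟨PySem.Dict.get?_insert_self _ _ _, hb.1, hb.2, hvisw, x, hxF, hw⟩
      have h4' : (p.1 ++ [w]).length + pvUnm g (p.2.insert w comp) ≤ pvUnm g vis := by
        have := pvUnm_insert (vis := p.2) (cc := comp) hpw hb.1 hb.2
        simp only [List.length_append, List.length_cons, List.length_nil]
        omega
      obtain ⟨R1, R2, R3, R4, R5, R6, R7⟩ :=
        ih hsub' (p.1 ++ [w], p.2.insert w comp) h1' (fun v hv hn => h2' v hv hn) h3' h4'
      rw [heq, if_pos hpw]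
      refine ⟨R1, R2, R3, R4, ?_, ?_, ?_⟩
      · intro w' hw'
        rcases List.mem_cons.mp hw' with rfl | hw''
        · have hwmem : w' ∈ (pvScanB g comp l (p.1 ++ [w'], p.2.insert w' comp)).1 :=
            R7 w' (by simp)
          have := (R3 w' hwmem).1
          simp [this]
        · exact R5 w' hw''
      · intro v hv
        apply R6 v
        by_cases hvw : v = w
        · subst hvw; simp [PySem.Dict.get?_insert_self]
        · rw [PySem.Dict.get?_insert_of_ne _ _ hvw]; exact hv
      · intro y hy
        exact R7 y (by simp [hy])
    · obtain ⟨R1, R2, R3, R4, R5, R6, R7⟩ := ih hsub' p h1 h2 h3 h4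
      rw [heq, if_neg hpw]
      refine ⟨R1, R2, R3, R4, ?_, R6, R7⟩
      intro w' hw'
      rcases List.mem_cons.mp hw' with rfl | hw''
      · exact R6 w' hpw
      · exact R5 w' hw''

-- invariants of one whole frontier round
theorem pvRoundB_spec (g : List (List Int)) (HG : pvGood g) (comp : Int) (F : List Int)
    (vis : PySem.Dict Int Int) :
    ∀ (l : List Int), (∀ u ∈ l, u ∈ F) → ∀ (p : List Int × PySem.Dict Int Int),
    (∀ v, vis.get? v ≠ none → p.2.get? v = vis.get? v) →
    (∀ v, vis.get? v = none → p.2.get? v ≠ none → p.2.get? v = some comp ∧ v ∈ p.1) →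
    (∀ y ∈ p.1, p.2.get? y = some comp ∧ -(g.length : Int) ≤ y ∧ y < (g.length : Int) ∧
        vis.get? y = none ∧ ∃ u ∈ F, y ∈ pvNbrs g u) →
    p.1.length + pvUnm g p.2 ≤ pvUnm g vis →
    ((∀ v, vis.get? v ≠ none → (pvRoundB g comp l p).2.get? v = vis.get? v) ∧
     (∀ v, vis.get? v = none → (pvRoundB g comp l p).2.get? v ≠ none →
         (pvRoundB g comp l p).2.get? v = some comp ∧ v ∈ (pvRoundB g comp l p).1) ∧
     (∀ y ∈ (pvRoundB g comp l p).1, (pvRoundB g comp l p).2.get? y = some comp ∧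
         -(g.length : Int) ≤ y ∧ y < (g.length : Int) ∧ vis.get? y = none ∧
         ∃ u ∈ F, y ∈ pvNbrs g u) ∧
     ((pvRoundB g comp l p).1.length + pvUnm g (pvRoundB g comp l p).2 ≤ pvUnm g vis) ∧
     (∀ u ∈ l, ∀ w ∈ pvNbrs g u, (pvRoundB g comp l p).2.get? w ≠ none) ∧
     (∀ v, p.2.get? v ≠ none → (pvRoundB g comp l p).2.get? v ≠ none)) := by
  intro l
  induction l with
  | nil =>
    intro _ p h1 h2 h3 h4
    simp only [pvRoundB]
    exact ⟨h1, h2, h3, h4, by simp, fun v hv => hv⟩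
  | cons u us ih =>
    intro hsub p h1 h2 h3 h4
    have huF : u ∈ F := hsub u (by simp)
    have hsub' : ∀ u' ∈ us, u' ∈ F := fun u' hu' => hsub u' (by simp [hu'])
    obtain ⟨S1, S2, S3, S4, S5, S6, S7⟩ :=
      pvScanB_spec g HG comp F vis u huF (pvNbrs g u) (fun w hw => hw) p h1 h2 h3 h4
    obtain ⟨R1, R2, R3, R4, R5, R6⟩ := ih hsub' (pvScanB g comp (pvNbrs g u) p) S1 S2 S3 S4
    have heq : pvRoundB g comp (u :: us) p =
        pvRoundB g comp us (pvScanB g comp (pvNbrs g u) p) := by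
      simp only [pvRoundB]
    rw [heq]
    refine ⟨R1, R2, R3, R4, ?_, ?_⟩
    · intro u' hu' w hw
      rcases List.mem_cons.mp hu' with rfl | hus
      · exact R6 w (S5 w hw)
      · exact R5 u' hus w hw
    · intro v hv
      exact R6 v (S6 v hv)

theorem pvBfsB_spec (g : List (List Int)) (HG : pvGood g) :
    ∀ (fuel : Nat) (frontier : List Int) (lab : PySem.Dict Int Int) (comp : Int),
    (∀ x ∈ frontier, lab.get? x = some comp ∧ -(g.length : Int) ≤ x ∧ x < (g.length : Int)) →
    frontier.length + pvUnm g lab ≤ fuel →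
    (∀ v, lab.get? v ≠ none → (pvBfsB g comp fuel frontier lab).get? v = lab.get? v) ∧
    (∀ v, lab.get? v = none → (pvBfsB g comp fuel frontier lab).get? v ≠ none →
        (pvBfsB g comp fuel frontier lab).get? v = some comp ∧
        ∃ x ∈ frontier, pvReach g (fun z => lab.get? z ≠ none ∧ z ∉ frontier) x v) ∧
    (∀ u, ((lab.get? u = none ∧ (pvBfsB g comp fuel frontier lab).get? u ≠ none) ∨ u ∈ frontier) →
        ∀ w ∈ pvNbrs g u, (pvBfsB g comp fuel frontier lab).get? w ≠ none) := by
  intro fuel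
  induction fuel with
  | zero =>
    intro frontier lab comp hst hf
    cases frontier with
    | nil =>
      have heq : pvBfsB g comp 0 ([] : List Int) lab = lab := by simp only [pvBfsB]
      rw [heq]
      refine ⟨fun v _ => rfl, fun v hv hn => absurd hv hn, ?_⟩
      rintro u (⟨hun, hn⟩ | hus) w hw
      · exact absurd hun hn
      · simp at hus
    | cons x rest => simp at hf
  | succ fuel ih =>
    intro frontier lab comp hst hf
    cases frontier with
    | nil =>
      have heq : pvBfsB g comp (fuel+1) ([] : List Int) lab = lab := by simp only [pvBfsB]
      rw [heq]
      refine ⟨fun v _ => rfl, fun v hv hn => absurd hv hn, ?_⟩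
      rintro u (⟨hun, hn⟩ | hus) w hw
      · exact absurd hun hn
      · simp at hus
    | cons x rest =>
      obtain ⟨R1, R2, R3, R4, R5, R6⟩ :=
        pvRoundB_spec g HG comp (x :: rest) lab (x :: rest) (fun u hu => hu) ([], lab)
          (fun v _ => rfl) (fun v hv hn => absurd hv hn) (by simp) (by simp)
      set st := pvRoundB g comp (x :: rest) ([], lab) with hstdef
      have hstk' : ∀ y ∈ st.1, st.2.get? y = some comp ∧
          -(g.length : Int) ≤ y ∧ y < (g.length : Int) :=
        fun y hy => ⟨(R3 y hy).1, (R3 y hy).2.1, (R3 y hy).2.2.1⟩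
      have hf' : st.1.length + pvUnm g st.2 ≤ fuel := by
        simp only [List.length_cons] at hf; omega
      obtain ⟨Q1, Q2, Q3⟩ := ih st.1 st.2 comp hstk' hf'
      have heq : pvBfsB g comp (fuel + 1) (x :: rest) lab = pvBfsB g comp fuel st.1 st.2 := by
        rw [hstdef]; simp only [pvBfsB]
      rw [heq]
      refine ⟨?_, ?_, ?_⟩
      · intro v hv
        rw [Q1 v (by rw [R1 v hv]; exact hv), R1 v hv]
      · intro v hv hn
        by_cases hpv : st.2.get? v = none
        · obtain ⟨hval, y, hy, hr⟩ := Q2 v hpv hn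
          refine ⟨hval, ?_⟩
          have hsub : ∀ z, (lab.get? z ≠ none ∧ z ∉ x :: rest) →
              (st.2.get? z ≠ none ∧ z ∉ st.1) := by
            rintro z ⟨hz1, hz2⟩
            refine ⟨by rw [R1 z hz1]; exact hz1, ?_⟩
            intro hzp
            exact hz1 (R3 z hzp).2.2.2.1
          have hr' := pvReach_anti hsub hr
          obtain ⟨-, -, -, -, u, hu, hynb⟩ := R3 y hy
          refine ⟨u, hu, pvReach_trans (pvReach.step (pvReach.refl u) ?_ hynb) hr'⟩
          rintro ⟨-, hus⟩; exact hus hu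
        · obtain ⟨hval, hmem⟩ := R2 v hv hpv
          obtain ⟨-, -, -, -, u, hu, hvnb⟩ := R3 v hmem
          exact ⟨by rw [Q1 v hpv]; exact hval,
            u, hu, pvReach.step (pvReach.refl u) (fun h => h.2 hu) hvnb⟩
      · intro u hu w hw
        rcases hu with ⟨hun, hn⟩ | hustack
        · by_cases hpu : st.2.get? u = none
          · exact Q3 u (Or.inl ⟨hpu, hn⟩) w hw
          · obtain ⟨-, hmem⟩ := R2 u hun hpu
            exact Q3 u (Or.inr hmem) w hw
        · have hwsome := R5 u hustack w hw
          rw [Q1 w hwsome]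
          exact hwsome

theorem pvBfsB_reach (g : List (List Int)) (HG : pvGood g)
    (fuel : Nat) (frontier : List Int) (lab : PySem.Dict Int Int) (comp : Int)
    (hst : ∀ x ∈ frontier, lab.get? x = some comp ∧ -(g.length : Int) ≤ x ∧ x < (g.length : Int))
    (hf : frontier.length + pvUnm g lab ≤ fuel) :
    ∀ x ∈ frontier, ∀ v, pvReach g (fun z => lab.get? z ≠ none ∧ z ∉ frontier) x v →
      (pvBfsB g comp fuel frontier lab).get? v ≠ none := by
  obtain ⟨ha, _, hd⟩ := pvBfsB_spec g HG fuel frontier lab comp hst hf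
  intro x hx v hr
  induction hr with
  | refl =>
    rw [ha _ (by simp [(hst x hx).1])]
    simp [(hst x hx).1]
  | step hru hu hw ih =>
    rename_i i u w
    rcases Classical.em (lab.get? u = none) with hvu | hvu
    · exact hd u (Or.inl ⟨hvu, ih⟩) _ hw
    · have hu' : u ∈ frontier := by
        by_contra hus; exact hu ⟨hvu, hus⟩
      exact hd u (Or.inr hu') _ hw

theorem pvBfsB_char (g : List (List Int)) (HG : pvGood g)
    (lab : PySem.Dict Int Int) (i comp : Int)
    (h0 : 0 ≤ i) (hl : i < (g.length : Int)) (hn : lab.get? i = none) (v : Int) :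
    (lab.get? v ≠ none →
        (pvBfsB g comp (2 * g.length) [i] (lab.insert i comp)).get? v = lab.get? v) ∧
    (lab.get? v = none → pvReach g (pvDm lab) i v →
        (pvBfsB g comp (2 * g.length) [i] (lab.insert i comp)).get? v = some comp) ∧
    (lab.get? v = none → ¬ pvReach g (pvDm lab) i v →
        (pvBfsB g comp (2 * g.length) [i] (lab.insert i comp)).get? v = none) := by
  have h0' : -(g.length : Int) ≤ i := by omega
  have hv1 : (lab.insert i comp).get? i = some comp := PySem.Dict.get?_insert_self _ _ _
  have hst : ∀ x ∈ ([i] : List Int),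
      (lab.insert i comp).get? x = some comp ∧ -(g.length : Int) ≤ x ∧ x < (g.length : Int) := by
    intro x hx; simp only [List.mem_singleton] at hx; subst hx; exact ⟨hv1, h0', hl⟩
  have hins := pvUnm_insert (vis := lab) (cc := comp) hn h0' hl
  have hle := pvUnm_le g lab
  have hf : ([i] : List Int).length + pvUnm g (lab.insert i comp) ≤ 2 * g.length := by
    simp only [List.length_cons, List.length_nil]; omega
  obtain ⟨A1, A2, A3⟩ := pvBfsB_spec g HG (2 * g.length) [i] (lab.insert i comp) comp hst hf
  have havoid1 : ∀ z, ((lab.insert i comp).get? z ≠ none ∧ z ∉ ([i] : List Int)) → pvDm lab z := by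
    rintro z ⟨hz1, hz2⟩
    have hzi : z ≠ i := by simpa using hz2
    rw [PySem.Dict.get?_insert_of_ne _ _ hzi] at hz1; exact hz1
  have havoid2 : ∀ z, pvDm lab z →
      ((lab.insert i comp).get? z ≠ none ∧ z ∉ ([i] : List Int)) := by
    intro z hz
    have hzi : z ≠ i := fun e => hz (e ▸ hn)
    exact ⟨by rw [PySem.Dict.get?_insert_of_ne _ _ hzi]; exact hz, by simp [hzi]⟩
  refine ⟨?_, ?_, ?_⟩
  · intro hv
    have hvi : v ≠ i := fun e => hv (e ▸ hn)
    rw [A1 v (by rw [PySem.Dict.get?_insert_of_ne _ _ hvi]; exact hv),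
       PySem.Dict.get?_insert_of_ne _ _ hvi]
  · intro hv hr
    by_cases hvi : v = i
    · subst hvi
      rw [A1 v (by rw [hv1]; simp)]
      exact hv1
    · have hr1 : pvReach g
          (fun z => (lab.insert i comp).get? z ≠ none ∧ z ∉ ([i] : List Int)) i v :=
        pvReach_anti havoid1 hr
      have hsome := pvBfsB_reach g HG (2 * g.length) [i] (lab.insert i comp) comp hst hf i
        (by simp) v hr1
      have hvins : (lab.insert i comp).get? v = none := by
        rw [PySem.Dict.get?_insert_of_ne _ _ hvi]; exact hv
      exact (A2 v hvins hsome).1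
  · intro hv hr
    by_cases hvi : v = i
    · exact absurd (by rw [hvi]; exact pvReach.refl i) hr
    · have hvins : (lab.insert i comp).get? v = none := by
        rw [PySem.Dict.get?_insert_of_ne _ _ hvi]; exact hv
      by_contra hne
      obtain ⟨-, x, hx, hrx⟩ := A2 v hvins hne
      simp only [List.mem_singleton] at hx; subst hx
      exact hr (pvReach_anti havoid2 hrx)

-- ---- main loops agree ----

theorem pvMain (g : List (List Int)) (HG : pvGood g) :
    ∀ (l : List Nat), (∀ i ∈ l, (i : Int) < (g.length : Int)) →
    ∀ (cc : Int) (dA dB : PySem.Dict Int Int), (∀ v, dA.get? v = dB.get? v) →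
    ∀ v,
    ((l.map (fun k : Nat => (k : Int))).foldl
        (fun (st : Int × PySem.Dict Int Int) i =>
          if st.2.get? i = none then (st.1 + 1, pvDfsA g (st.1 + 1) (2 * g.length) i st.2) else st)
        (cc, dA)).2.get? v =
    (pvOuterB g l cc dB).get? v := by
  intro l
  induction l with
  | nil =>
    intro _ cc dA dB hEq v
    simpa only [List.map_nil, List.foldl_nil, pvOuterB] using hEq v
  | cons i l ih =>
    intro hb cc dA dB hEq v
    have hbi : (i : Int) < (g.length : Int) := hb i (by simp)
    have h0i : (0 : Int) ≤ (i : Int) := Int.natCast_nonneg i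
    have hbl : ∀ j ∈ l, (j : Int) < (g.length : Int) := fun j hj => hb j (by simp [hj])
    simp only [List.map_cons, List.foldl_cons, pvOuterB]
    by_cases hi : dA.get? (i : Int) = none
    · have hiB : dB.get? (i : Int) = none := by rw [← hEq (i : Int)]; exact hi
      rw [if_pos (show ((cc, dA) : Int × PySem.Dict Int Int).2.get? (i : Int) = none from hi),
          if_pos hiB]
      apply ih hbl
      intro w
      have hDm : pvDm dA = pvDm dB := funext fun z => by unfold pvDm; rw [hEq z]
      obtain ⟨CA1, CA2, CA3⟩ := pvDfsA_char g HG dA (i : Int) (cc + 1) h0i hbi hi w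
      obtain ⟨CB1, CB2, CB3⟩ := pvBfsB_char g HG dB (i : Int) (cc + 1) h0i hbi hiB w
      by_cases hw : dA.get? w = none
      · have hwB : dB.get? w = none := by rw [← hEq w]; exact hw
        by_cases hr : pvReach g (pvDm dA) (i : Int) w
        · rw [CA2 hw hr, CB2 hwB (by rw [← hDm]; exact hr)]
        · rw [CA3 hw hr, CB3 hwB (by rw [← hDm]; exact hr)]
      · have hwB : dB.get? w ≠ none := by rw [← hEq w]; exact hw
        rw [CA1 hw, CB1 hwB, hEq w]
    · have hiB : ¬ dB.get? (i : Int) = none := by rw [← hEq (i : Int)]; exact hi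
      rw [if_neg (show ¬ ((cc, dA) : Int × PySem.Dict Int Int).2.get? (i : Int) = none from hi),
          if_neg hiB]
      exact ih hbl cc dA dB hEq v

-- ===== VERDICT (by name: the statement is the Claim_ definition above) =====
theorem connected_component_queries_spec : Claim_equal_connected_component_queries := by
  intro graph queries _ hpre
  unfold Spec_connected_component_queries
  obtain ⟨hg, -⟩ := hpre
  have HG := pvGood_of_pre hg
  have hrange : PySem.List.pyRange 0 (graph.length : Int) 1 =
      (List.range graph.length).map (fun k : Nat => (k : Int)) := by
    rw [PySem.List.pyRange_one]
    simp
  have hmem : ∀ i ∈ List.range graph.length, (i : Int) < (graph.length : Int) := by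
    intro i hi
    exact_mod_cast List.mem_range.mp hi
  have hdicts := pvMain graph HG (List.range graph.length) hmem 0
    PySem.Dict.empty PySem.Dict.empty (fun v => rfl)
  simp only [connected_component_queries, connected_component_queries_alt]
  rw [hrange, PySem.List.foldl_append_singleton_eq_map]
  refine List.map_congr_left ?_
  intro q _
  rw [hdicts q.1, hdicts q.2]
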